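-- pv_equiv track=rewrite | github.com/thasayus/cognition-inspired | create_trec-5a.py | findXY
-- ===== SOURCE A (Python) =====
-- def findXY(sentenses, ci, cj, cl):
--     i = ci
--     j = cj
--     while i < len(sentenses):
--         le = len(sentenses[i])
--         if (le-j)-cl<=0:
--             if i+1 >= len(sentenses):
--                 return None
--             i = i + 1
--             return findXY(sentenses, i, 0, cl - (le-j))
--         else:
--             j = j + cl
--             return [i , j]
-- ===== SOURCE B (Python) =====
-- def findXY(sentenses, ci, cj, cl):
--     n = len(sentenses)
--     if ci < 0 or ci >= n:
--         return None
--     prefix = [0]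
--     acc = 0
--     for s in sentenses:
--         acc += len(s)
--         prefix.append(acc)
--     target = prefix[ci] + cj + cl
--     # binary search: smallest p in [ci+1, n+1] with p == n+1 or prefix[p] > target
--     lo, hi = ci + 1, n + 1
--     while lo < hi:
--         mid = (lo + hi) // 2
--         if prefix[mid] <= target:
--             lo = mid + 1
--         else:
--             hi = mid
--     if lo == n + 1:
--         return None
--     return [lo - 1, target - prefix[lo - 1]]
-- ===== Notes on version B (the rewrite author's own statement) =====
-- stated objective: alternative
-- what changed: B replaces A's sentence-by-sentence recursive consumption of the offset with a prefix-sum table over all sentence lengths plus a binary search for the first prefix exceeding the absolute target position.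
-- outside the precondition, e.g. on findXY(['ab', 'cde'], -1, 0, 1): A returns [-1, 1], B returns None
import Mathlib
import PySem

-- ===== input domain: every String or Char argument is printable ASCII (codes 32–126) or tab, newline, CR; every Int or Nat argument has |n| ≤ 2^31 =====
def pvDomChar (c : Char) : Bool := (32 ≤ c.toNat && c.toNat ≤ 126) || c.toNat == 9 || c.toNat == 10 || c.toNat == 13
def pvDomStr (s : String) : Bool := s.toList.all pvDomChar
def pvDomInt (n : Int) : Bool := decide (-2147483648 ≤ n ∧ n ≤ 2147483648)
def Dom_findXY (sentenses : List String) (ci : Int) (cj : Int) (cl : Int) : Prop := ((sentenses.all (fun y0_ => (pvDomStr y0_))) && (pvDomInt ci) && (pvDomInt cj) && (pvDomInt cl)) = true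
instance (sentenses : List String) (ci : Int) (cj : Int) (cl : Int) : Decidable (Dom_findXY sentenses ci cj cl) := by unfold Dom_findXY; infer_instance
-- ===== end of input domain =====

-- B replaces A's sentence-by-sentence recursive consumption by a prefix-sum table plus a binary
-- search for the first prefix exceeding the absolute target position (objective: alternative).

-- ===== PORT A =====
-- fuel only makes the recursion structural; it is never exhausted (A advances i by one per
-- call and stops before len(sentenses), so (len - ci) + 1 calls always suffice)
def findXYgo (sentenses : List String) : Nat → Int → Int → Int → Option (List Int)
  | 0, _, _, _ => none
  | fuel + 1, ci, cj, cl =>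
    if ci < (sentenses.length : Int) then
      match PySem.List.pyGet? sentenses ci with
      | none => none   -- Python raises IndexError here (ci < -len); outside Pre_findXY
      | some t =>
        let le : Int := PySem.Str.len t
        if (le - cj) - cl ≤ 0 then
          if ci + 1 ≥ (sentenses.length : Int) then none
          else findXYgo sentenses fuel (ci + 1) 0 (cl - (le - cj))
        else some [ci, cj + cl]
    else none

def findXY (sentenses : List String) (ci : Int) (cj : Int) (cl : Int) : Option (List Int) :=
  findXYgo sentenses (((sentenses.length : Int) - ci).toNat + 1) ci cj cl

-- ===== PORT B =====
-- prefix = [0]; acc = 0; for s in sentenses: acc += len(s); prefix.append(acc)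
def pvPrefix (acc : Int) : List String → List Int
  | [] => []
  | t :: ts => (acc + PySem.Str.len t) :: pvPrefix (acc + PySem.Str.len t) ts

-- while lo < hi: mid = (lo+hi)//2; if prefix[mid] <= target: lo = mid+1 else: hi = mid
-- (fuel only makes the loop structural: the interval shrinks at every step, so hi - lo + 1 suffices)
def pvBsearchGo (pre : List Int) (target : Int) : Nat → Nat → Nat → Nat
  | 0, lo, _ => lo
  | fuel + 1, lo, hi =>
    if lo < hi then
      if pre.getD ((lo + hi) / 2) 0 ≤ target then pvBsearchGo pre target fuel ((lo + hi) / 2 + 1) hi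
      else pvBsearchGo pre target fuel lo ((lo + hi) / 2)
    else lo

def pvBsearch (pre : List Int) (target : Int) (lo hi : Nat) : Nat :=
  pvBsearchGo pre target (hi - lo + 1) lo hi

def findXY_alt (sentenses : List String) (ci : Int) (cj : Int) (cl : Int) : Option (List Int) :=
  let n := sentenses.length
  if ci < 0 ∨ ci ≥ (n : Int) then none
  else
    let pre := 0 :: pvPrefix 0 sentenses
    let target := pre.getD ci.toNat 0 + cj + cl
    let lo := pvBsearch pre target (ci.toNat + 1) (n + 1)
    if lo = n + 1 then none
    else some [(lo : Int) - 1, target - pre.getD (lo - 1) 0]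

-- ===== PRECONDITION & SPEC =====
-- Pre_ excludes negative ci: for ci < -len(sentenses) A raises IndexError, and for
-- -len ≤ ci < 0 A's value comes from Python negative-index wraparound combined with a
-- forward-advancing counter, an accidental corner behaviour; B returns None there.
def Pre_findXY (sentenses : List String) (ci : Int) (cj : Int) (cl : Int) : Prop := 0 ≤ ci
instance (sentenses : List String) (ci : Int) (cj : Int) (cl : Int) : Decidable (Pre_findXY sentenses ci cj cl) := by unfold Pre_findXY; infer_instance
def pvWitness_findXY : List String × Int × Int × Int := ([], 0, 0, 1)

def Spec_findXY (sentenses : List String) (ci : Int) (cj : Int) (cl : Int) (out : Option (List Int)) : Prop := out = findXY_alt sentenses ci cj cl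
instance (sentenses : List String) (ci : Int) (cj : Int) (cl : Int) (out : Option (List Int)) : Decidable (Spec_findXY sentenses ci cj cl out) := by unfold Spec_findXY; infer_instance

-- ===== CLAIM (what is proved, stated in full; the proofs are below) =====
def Claim_equal_findXY : Prop := ∀ (sentenses : List String) (ci : Int) (cj : Int) (cl : Int), Dom_findXY sentenses ci cj cl → Pre_findXY sentenses ci cj cl → Spec_findXY sentenses ci cj cl (findXY sentenses ci cj cl)

-- ===== LEMMAS AND PROOFS =====
def pvSumLen (l : List String) : Int := (l.map PySem.Str.len).sum

theorem pvSumLen_nonneg (l : List String) : 0 ≤ pvSumLen l := by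
  induction l with
  | nil => simp [pvSumLen]
  | cons t ts ih =>
    have := PySem.Str.len_eq t
    simp only [pvSumLen, List.map_cons, List.sum_cons] at *
    omega

theorem pvSumLen_append (x y : List String) : pvSumLen (x ++ y) = pvSumLen x + pvSumLen y := by
  simp [pvSumLen]

theorem pvSumLen_take_le (l : List String) (a : Nat) : pvSumLen (l.take a) ≤ pvSumLen l := by
  conv_rhs => rw [← List.take_append_drop a l]
  rw [pvSumLen_append]
  have := pvSumLen_nonneg (l.drop a)
  omega

theorem pvSumLen_take_mono (s : List String) {a b : Nat} (h : a ≤ b) :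
    pvSumLen (s.take a) ≤ pvSumLen (s.take b) := by
  have h1 : s.take a = (s.take b).take a := by
    rw [List.take_take, Nat.min_eq_left h]
  rw [h1]
  exact pvSumLen_take_le _ _

theorem pvPrefix_length (acc : Int) (s : List String) : (pvPrefix acc s).length = s.length := by
  induction s generalizing acc with
  | nil => simp [pvPrefix]
  | cons t ts ih => simp [pvPrefix, ih]

theorem pvPrefix_getD (s : List String) : ∀ (acc : Int) (i : Nat), i < s.length →
    (pvPrefix acc s).getD i 0 = acc + pvSumLen (s.take (i + 1)) := by
  induction s with
  | nil => intro acc i h; simp at h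
  | cons t ts ih =>
    intro acc i h
    cases i with
    | zero => simp [pvPrefix, pvSumLen]
    | succ i =>
      have h' : i < ts.length := by simpa using h
      simp only [pvPrefix, List.getD_cons_succ, ih (acc + PySem.Str.len t) i h',
        List.take_succ_cons]
      simp [pvSumLen]; ring

theorem pvPre_getD (s : List String) : ∀ i, i ≤ s.length →
    (0 :: pvPrefix 0 s).getD i 0 = pvSumLen (s.take i) := by
  intro i h
  cases i with
  | zero => simp [pvSumLen]
  | succ i =>
    have h' : i < s.length := by omega
    rw [List.getD_cons_succ, pvPrefix_getD s 0 i h']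
    simp

theorem pvLeast_unique {P : Nat → Prop} {lo hi r1 r2 : Nat}
    (a1 : lo ≤ r1) (b1 : r1 ≤ hi) (c1 : ∀ m, lo ≤ m → m < r1 → P m) (d1 : r1 < hi → ¬ P r1)
    (a2 : lo ≤ r2) (b2 : r2 ≤ hi) (c2 : ∀ m, lo ≤ m → m < r2 → P m) (d2 : r2 < hi → ¬ P r2) :
    r1 = r2 := by
  rcases lt_trichotomy r1 r2 with h | h | h
  · exact absurd (c2 r1 a1 h) (d1 (lt_of_lt_of_le h b2))
  · exact h
  · exact absurd (c1 r2 a2 h) (d2 (lt_of_lt_of_le h b1))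

theorem pvBsearchGo_spec (pre : List Int) (target : Int)
    (mono : ∀ a b : Nat, a ≤ b → b < pre.length → pre.getD b 0 ≤ target → pre.getD a 0 ≤ target) :
    ∀ fuel lo hi, hi - lo < fuel → lo ≤ hi → hi ≤ pre.length →
      lo ≤ pvBsearchGo pre target fuel lo hi ∧ pvBsearchGo pre target fuel lo hi ≤ hi ∧
      (∀ m, lo ≤ m → m < pvBsearchGo pre target fuel lo hi → pre.getD m 0 ≤ target) ∧
      (pvBsearchGo pre target fuel lo hi < hi → ¬ pre.getD (pvBsearchGo pre target fuel lo hi) 0 ≤ target) := by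
  intro fuel
  induction fuel with
  | zero => intro lo hi hf _ _; exact absurd hf (Nat.not_lt_zero _)
  | succ fuel IH =>
    intro lo hi hf hle hhi
    simp only [pvBsearchGo]
    by_cases h : lo < hi
    · simp only [if_pos h]
      by_cases hc : pre.getD ((lo + hi) / 2) 0 ≤ target
      · simp only [if_pos hc]
        obtain ⟨a, b, c, d⟩ := IH ((lo + hi) / 2 + 1) hi (by omega) (by omega) hhi
        refine ⟨by omega, b, ?_, d⟩
        intro m hm hmr
        by_cases hmm : m ≤ (lo + hi) / 2
        · exact mono m ((lo + hi) / 2) hmm (by omega) hc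
        · exact c m (by omega) hmr
      · simp only [if_neg hc]
        obtain ⟨a, b, c, d⟩ := IH lo ((lo + hi) / 2) (by omega) (by omega) (by omega)
        refine ⟨a, by omega, c, ?_⟩
        intro _
        by_cases hr : pvBsearchGo pre target fuel lo ((lo + hi) / 2) < (lo + hi) / 2
        · exact d hr
        · have heq : pvBsearchGo pre target fuel lo ((lo + hi) / 2) = (lo + hi) / 2 := by omega
          rw [heq]; exact hc
    · simp only [if_neg h]
      exact ⟨le_refl _, hle, by omega, fun hlt => absurd hlt h⟩

theorem pvBsearch_spec (pre : List Int) (target : Int)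
    (mono : ∀ a b : Nat, a ≤ b → b < pre.length → pre.getD b 0 ≤ target → pre.getD a 0 ≤ target)
    (k lo hi : Nat) (hk : hi - lo = k) (hle : lo ≤ hi) (hhi : hi ≤ pre.length) :
    lo ≤ pvBsearch pre target lo hi ∧ pvBsearch pre target lo hi ≤ hi ∧
    (∀ m, lo ≤ m → m < pvBsearch pre target lo hi → pre.getD m 0 ≤ target) ∧
    (pvBsearch pre target lo hi < hi → ¬ pre.getD (pvBsearch pre target lo hi) 0 ≤ target) := by
  unfold pvBsearch
  exact pvBsearchGo_spec pre target mono (hi - lo + 1) lo hi (by omega) hle hhi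

theorem findXYgo_eq (s : List String) :
    ∀ fuel (ci cj cl : Int), ((s.length : Int) - ci).toNat < fuel → 0 ≤ ci →
      findXYgo s fuel ci cj cl = findXY_alt s ci cj cl := by
  intro fuel
  induction fuel with
  | zero => intro ci cj cl hk _; exact absurd hk (Nat.not_lt_zero _)
  | succ fuel IH =>
    intro ci cj cl hk h0
    by_cases hlt : ci < (s.length : Int)
    · -- ci in range
      have hin : ci.toNat < s.length := by omega
      have hcast : (ci.toNat : Int) = ci := by omega
      simp only [findXYgo]
      rw [if_pos hlt, PySem.List.pyGet?_eq_some_getElem s h0 hlt]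
      have hlen : (0 :: pvPrefix 0 s).length = s.length + 1 := by
        simp [pvPrefix_length]
      have hP : ∀ j, j ≤ s.length → (0 :: pvPrefix 0 s).getD j 0 = pvSumLen (s.take j) :=
        pvPre_getD s
      have hmono : ∀ a b : Nat, a ≤ b → b < (0 :: pvPrefix 0 s).length →
          ∀ tg : Int, (0 :: pvPrefix 0 s).getD b 0 ≤ tg → (0 :: pvPrefix 0 s).getD a 0 ≤ tg := by
        intro a b hab hb tg hbt
        rw [hP b (by omega)] at hbt
        rw [hP a (by omega)]
        exact le_trans (pvSumLen_take_mono s hab) hbt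
      have hle : PySem.Str.len s[ci.toNat] =
          pvSumLen (s.take (ci.toNat + 1)) - pvSumLen (s.take ci.toNat) := by
        have ht : s.take (ci.toNat + 1) = s.take ci.toNat ++ [s[ci.toNat]] := by
          rw [List.take_succ]
          simp [List.getElem?_eq_getElem hin]
        rw [ht, pvSumLen_append]
        simp [pvSumLen]
      have hguard : ¬ (ci < 0 ∨ ci ≥ (s.length : Int)) := by omega
      by_cases hcond : (PySem.Str.len s[ci.toNat] - cj) - cl ≤ 0
      · -- A consumes this sentence
        have hkey : (0 :: pvPrefix 0 s).getD (ci.toNat + 1) 0 ≤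
            (0 :: pvPrefix 0 s).getD ci.toNat 0 + cj + cl := by
          rw [hP (ci.toNat + 1) (by omega), hP ci.toNat (by omega)]
          omega
        by_cases hend : ci + 1 ≥ (s.length : Int)
        · -- last sentence: A returns none
          simp only [if_pos hcond, if_pos hend]
          simp only [findXY_alt]
          rw [if_neg hguard]
          have hi1 : ci.toNat + 1 = s.length := by omega
          obtain ⟨ra, rb, rc, rd⟩ := pvBsearch_spec (0 :: pvPrefix 0 s)
            ((0 :: pvPrefix 0 s).getD ci.toNat 0 + cj + cl)
            (fun a b hab hb => hmono a b hab hb _)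
            (s.length + 1 - (ci.toNat + 1)) (ci.toNat + 1) (s.length + 1) rfl (by omega) (by omega)
          have hr : pvBsearch (0 :: pvPrefix 0 s)
              ((0 :: pvPrefix 0 s).getD ci.toNat 0 + cj + cl) (ci.toNat + 1) (s.length + 1)
              = s.length + 1 := by
            by_contra hne
            exact rd (by omega) (by rw [show pvBsearch (0 :: pvPrefix 0 s)
              ((0 :: pvPrefix 0 s).getD ci.toNat 0 + cj + cl) (ci.toNat + 1) (s.length + 1)
              = ci.toNat + 1 from by omega]; exact hkey)
          rw [if_pos hr]
        · -- A recurses to the next sentence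
          simp only [if_pos hcond, if_neg hend]
          rw [IH (ci + 1) 0 (cl - (PySem.Str.len s[ci.toNat] - cj)) (by omega) (by omega)]
          have hguard' : ¬ (ci + 1 < 0 ∨ ci + 1 ≥ (s.length : Int)) := by omega
          simp only [findXY_alt]
          rw [if_neg hguard, if_neg hguard']
          have hsucc : (ci + 1).toNat = ci.toNat + 1 := by omega
          rw [hsucc]
          have htg : (0 :: pvPrefix 0 s).getD (ci.toNat + 1) 0 + 0 +
              (cl - (PySem.Str.len s[ci.toNat] - cj))
              = (0 :: pvPrefix 0 s).getD ci.toNat 0 + cj + cl := by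
            rw [hP (ci.toNat + 1) (by omega), hP ci.toNat (by omega)]
            omega
          rw [htg]
          obtain ⟨a1, b1, c1, d1⟩ := pvBsearch_spec (0 :: pvPrefix 0 s)
            ((0 :: pvPrefix 0 s).getD ci.toNat 0 + cj + cl)
            (fun a b hab hb => hmono a b hab hb _)
            (s.length + 1 - (ci.toNat + 1)) (ci.toNat + 1) (s.length + 1) rfl (by omega) (by omega)
          obtain ⟨a2, b2, c2, d2⟩ := pvBsearch_spec (0 :: pvPrefix 0 s)
            ((0 :: pvPrefix 0 s).getD ci.toNat 0 + cj + cl)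
            (fun a b hab hb => hmono a b hab hb _)
            (s.length + 1 - (ci.toNat + 1 + 1)) (ci.toNat + 1 + 1) (s.length + 1) rfl (by omega) (by omega)
          have hr12 : pvBsearch (0 :: pvPrefix 0 s)
              ((0 :: pvPrefix 0 s).getD ci.toNat 0 + cj + cl) (ci.toNat + 1 + 1) (s.length + 1)
              = pvBsearch (0 :: pvPrefix 0 s)
              ((0 :: pvPrefix 0 s).getD ci.toNat 0 + cj + cl) (ci.toNat + 1) (s.length + 1) := by
            refine pvLeast_unique (lo := ci.toNat + 1) (hi := s.length + 1)
              (by omega) b2 ?_ d2 a1 b1 c1 d1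
            intro m hm hmr
            by_cases hmeq : m = ci.toNat + 1
            · rw [hmeq]; exact hkey
            · exact c2 m (by omega) hmr
          rw [hr12]
      · -- A returns [ci, cj + cl] at this sentence
        simp only [if_neg hcond]
        simp only [findXY_alt]
        rw [if_neg hguard]
        obtain ⟨ra, rb, rc, rd⟩ := pvBsearch_spec (0 :: pvPrefix 0 s)
          ((0 :: pvPrefix 0 s).getD ci.toNat 0 + cj + cl)
          (fun a b hab hb => hmono a b hab hb _)
          (s.length + 1 - (ci.toNat + 1)) (ci.toNat + 1) (s.length + 1) rfl (by omega) (by omega)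
        have hstop : ¬ (0 :: pvPrefix 0 s).getD (ci.toNat + 1) 0 ≤
            (0 :: pvPrefix 0 s).getD ci.toNat 0 + cj + cl := by
          rw [hP (ci.toNat + 1) (by omega), hP ci.toNat (by omega)]
          omega
        have hr : pvBsearch (0 :: pvPrefix 0 s)
            ((0 :: pvPrefix 0 s).getD ci.toNat 0 + cj + cl) (ci.toNat + 1) (s.length + 1)
            = ci.toNat + 1 := by
          by_contra hne
          exact hstop (rc (ci.toNat + 1) (le_refl _) (by omega))
        rw [hr, if_neg (by omega : ¬ ci.toNat + 1 = s.length + 1)]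
        have h1 : ((ci.toNat + 1 : Nat) : Int) - 1 = ci := by omega
        have h2 : ci.toNat + 1 - 1 = ci.toNat := rfl
        rw [h1, h2]
        refine congrArg some ?_
        have hX : (0 :: pvPrefix 0 s).getD ci.toNat 0 + cj + cl -
            (0 :: pvPrefix 0 s).getD ci.toNat 0 = cj + cl := by ring
        rw [hX]
    · -- ci ≥ len: both none
      simp only [findXYgo]
      rw [if_neg hlt]
      simp only [findXY_alt]
      rw [if_pos (Or.inr (not_lt.mp hlt))]

-- ===== VERDICT (by name: the statement is the Claim_ definition above) =====
theorem findXY_spec : Claim_equal_findXY := by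
  intro s ci cj cl _dom hpre
  exact findXYgo_eq s _ ci cj cl (by omega) hpre
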